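-- pv_equiv track=rewrite | github.com/SulaymanB2024/cuddly-waffle | seo_audit/page_controls.py | _most_restrictive_numeric
-- ===== SOURCE A (Python) =====
-- def _most_restrictive_numeric(values: list[str]) -> str:
--     if not values:
--         return ""
--
--     parsed: list[int] = []
--     for value in values:
--         try:
--             parsed.append(int(value))
--         except ValueError:
--             continue
--
--     if parsed:
--         non_negative = [value for value in parsed if value >= 0]
--         if non_negative:
--             return str(min(non_negative))
--         return str(max(parsed))
--
--     return values[0]
-- ===== SOURCE B (Python) =====
-- def _most_restrictive_numeric(values: list[str]) -> str:
--     if not values: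
--         return ""
--     min_nonneg = None
--     max_all = None
--     for value in values:
--         try:
--             n = int(value)
--         except ValueError:
--             continue
--         if n >= 0:
--             min_nonneg = n if min_nonneg is None else min(min_nonneg, n)
--         max_all = n if max_all is None else max(max_all, n)
--     if min_nonneg is not None:
--         return str(min_nonneg)
--     if max_all is not None:
--         return str(max_all)
--     return values[0]
-- ===== Notes on version B (the rewrite author's own statement) =====
-- stated objective: alternative
-- what changed: Replaced A's build-parsed-list, filter-nonnegatives, then min/max passes by a single pass that maintains a running minimum of non-negative parses and a running maximum of all parses, deciding the result from the two accumulators.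
import Mathlib
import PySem

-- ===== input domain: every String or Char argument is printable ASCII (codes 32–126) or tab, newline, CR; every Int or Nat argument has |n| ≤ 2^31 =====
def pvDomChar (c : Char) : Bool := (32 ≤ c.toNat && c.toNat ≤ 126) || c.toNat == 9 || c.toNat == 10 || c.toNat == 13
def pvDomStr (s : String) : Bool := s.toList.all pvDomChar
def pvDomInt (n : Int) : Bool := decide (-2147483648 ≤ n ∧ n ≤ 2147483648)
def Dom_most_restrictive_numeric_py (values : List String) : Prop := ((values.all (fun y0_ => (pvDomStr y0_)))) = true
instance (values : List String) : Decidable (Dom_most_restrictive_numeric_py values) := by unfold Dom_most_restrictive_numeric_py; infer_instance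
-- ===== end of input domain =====

-- B replaces A's build-list-then-filter-then-min/max structure by one pass with two running accumulators (alternative decomposition, same cost).

-- ===== PORT A =====
def most_restrictive_numeric_py (values : List String) : String :=
  if values = [] then ""
  else
    let parsed : List Int := values.foldl (fun acc v =>
      match PySem.Int.ofStr? v with
      | some n => acc ++ [n]
      | none => acc) []
    if parsed ≠ [] then
      let nonNegative := parsed.filter (fun n => decide (0 ≤ n))
      if nonNegative ≠ [] then
        match PySem.List.min? nonNegative (fun y => y) with
        | some m => PySem.Int.toStr m
        | none => ""
      else
        match PySem.List.max? parsed (fun y => y) with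
        | some m => PySem.Int.toStr m
        | none => ""
    else
      PySem.List.pyGetD values 0 ""

-- ===== PORT B =====
-- one step of B's single pass: update (running min of non-negative parses, running max of all parses)
def pvAltStep (st : Option Int × Option Int) (v : String) : Option Int × Option Int :=
  match PySem.Int.ofStr? v with
  | none => st
  | some n =>
    ((if 0 ≤ n then some (match st.1 with | none => n | some m => min m n) else st.1),
     some (match st.2 with | none => n | some m => max m n))

def most_restrictive_numeric_py_alt (values : List String) : String :=
  match values with
  | [] => ""
  | v0 :: rest =>
    let st := (v0 :: rest).foldl pvAltStep (none, none)
    match st.1 with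
    | some m => PySem.Int.toStr m
    | none =>
      match st.2 with
      | some m => PySem.Int.toStr m
      | none => v0

-- ===== PRECONDITION & SPEC =====
def Spec_most_restrictive_numeric_py (values : List String) (out : String) : Prop := out = most_restrictive_numeric_py_alt values
instance (values : List String) (out : String) : Decidable (Spec_most_restrictive_numeric_py values out) := by unfold Spec_most_restrictive_numeric_py; infer_instance

-- ===== CLAIM (what is proved, stated in full; the proofs are below) =====
def Claim_equal_most_restrictive_numeric_py : Prop := ∀ (values : List String), Dom_most_restrictive_numeric_py values → Spec_most_restrictive_numeric_py values (most_restrictive_numeric_py values)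

-- ===== LEMMAS AND PROOFS =====

def pvFoldMinO (o : Option Int) (l : List Int) : Option Int :=
  l.foldl (fun a n => some (match a with | none => n | some m => min m n)) o

def pvFoldMaxO (o : Option Int) (l : List Int) : Option Int :=
  l.foldl (fun a n => some (match a with | none => n | some m => max m n)) o

theorem pvFoldMinO_some (l : List Int) : ∀ m, pvFoldMinO (some m) l = some (l.foldl min m) := by
  induction l with
  | nil => intro m; rfl
  | cons x t ih => intro m; simpa [pvFoldMinO, List.foldl] using ih (min m x)

theorem pvFoldMaxO_some (l : List Int) : ∀ m, pvFoldMaxO (some m) l = some (l.foldl max m) := by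
  induction l with
  | nil => intro m; rfl
  | cons x t ih => intro m; simpa [pvFoldMaxO, List.foldl] using ih (max m x)

-- A's parsing loop builds acc ++ filterMap
theorem pvParseFold (values : List String) : ∀ acc : List Int,
    values.foldl (fun acc v =>
      match PySem.Int.ofStr? v with
      | some n => acc ++ [n]
      | none => acc) acc = acc ++ values.filterMap PySem.Int.ofStr? := by
  induction values with
  | nil => intro acc; simp [List.foldl]
  | cons v vs ih =>
    intro acc
    cases h : PySem.Int.ofStr? v with
    | none => simp [List.foldl, h, ih]
    | some n => simp [List.foldl, h, ih]

-- B's fold computes (min of nonneg parses, max of all parses) as option-accumulators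
theorem pvAltFold (values : List String) : ∀ s : Option Int × Option Int,
    values.foldl pvAltStep s =
      (pvFoldMinO s.1 ((values.filterMap PySem.Int.ofStr?).filter (fun n => decide (0 ≤ n))),
       pvFoldMaxO s.2 (values.filterMap PySem.Int.ofStr?)) := by
  induction values with
  | nil => intro s; simp [pvFoldMinO, pvFoldMaxO]
  | cons v vs ih =>
    intro s
    cases h : PySem.Int.ofStr? v with
    | none => simp [List.foldl, pvAltStep, h, ih]
    | some n =>
      by_cases hn : 0 ≤ n
      · simp [List.foldl, pvAltStep, h, hn, ih, pvFoldMinO, pvFoldMaxO]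
      · simp [List.foldl, pvAltStep, h, hn, ih, pvFoldMinO, pvFoldMaxO]

-- ===== VERDICT (by name: the statement is the Claim_ definition above) =====
theorem most_restrictive_numeric_py_spec : Claim_equal_most_restrictive_numeric_py := by
  intro values _
  unfold Spec_most_restrictive_numeric_py most_restrictive_numeric_py most_restrictive_numeric_py_alt
  cases values with
  | nil => simp
  | cons v0 rest =>
    simp only [reduceCtorEq, if_false, pvParseFold, List.nil_append, pvAltFold]
    cases hp : (v0 :: rest).filterMap PySem.Int.ofStr? with
    | nil => simp [pvFoldMinO, pvFoldMaxO, PySem.List.pyGetD_zero_cons]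
    | cons q qs =>
      cases hnn : ((q :: qs).filter (fun n => decide (0 ≤ n))) with
      | nil =>
        have h2 : pvFoldMaxO none (q :: qs) = some (qs.foldl max q) := by
          simpa [pvFoldMaxO, List.foldl] using pvFoldMaxO_some qs q
        simp [hnn, pvFoldMinO, PySem.List.max?_id_cons, h2]
      | cons r rs =>
        have h1 : pvFoldMinO none (r :: rs) = some (rs.foldl min r) := by
          simpa [pvFoldMinO, List.foldl] using pvFoldMinO_some rs r
        simp [PySem.List.min?_id_cons, h1]
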